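-- pv_equiv track=rewrite | github.com/DSpike/FedTTA-Z | auto_config_sync.py | _find_field_line_number
-- ===== SOURCE A (Python) =====
-- def _find_field_line_number(content: str, field_name: str) -> int:
--     """Find the line number of a field in EnhancedSystemConfig"""
--     lines = content.split('\n')
--     in_enhanced_config = False
--
--     for i, line in enumerate(lines, 1):
--         if 'class EnhancedSystemConfig:' in line:
--             in_enhanced_config = True
--             continue
--
--         if in_enhanced_config and line.strip().startswith('class '):
--             break
--
--         if in_enhanced_config and f'{field_name}:' in line:
--             return i
--
--     return 0
-- ===== SOURCE B (Python) =====
-- def _find_field_line_number(content: str, field_name: str) -> int: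
--     """Find the line number of a field in EnhancedSystemConfig."""
--     lines = content.split('\n')
--     starts = [i for i, line in enumerate(lines) if 'class EnhancedSystemConfig:' in line]
--     if not starts:
--         return 0
--     body = lines[starts[0] + 1:]
--     ends = [j for j, line in enumerate(body) if line.strip().startswith('class ')]
--     region = body[:ends[0]] if ends else body
--     hits = [k for k, line in enumerate(region) if f'{field_name}:' in line]
--     return starts[0] + 2 + hits[0] if hits else 0
-- ===== Notes on version B (the rewrite author's own statement) =====
-- stated objective: alternative
-- what changed: Replaces A's stateful flag-driven single loop by staged comprehension passes: collect header indices, slice out the class body, cut it at the next class line, and index the first field hit; Pre_ excludes content where the line 'class EnhancedSystemConfig:' occurs on more than one line, a degenerate corner where A's flag-reset makes a repeated header extend the region while B's natural region cut ends it, both defensible.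
-- outside the precondition, e.g. on _find_field_line_number('class EnhancedSystemConfig:\nclass EnhancedSystemConfig:\nx: 1', 'x'): A returns 3, B returns 0
import Mathlib
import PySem

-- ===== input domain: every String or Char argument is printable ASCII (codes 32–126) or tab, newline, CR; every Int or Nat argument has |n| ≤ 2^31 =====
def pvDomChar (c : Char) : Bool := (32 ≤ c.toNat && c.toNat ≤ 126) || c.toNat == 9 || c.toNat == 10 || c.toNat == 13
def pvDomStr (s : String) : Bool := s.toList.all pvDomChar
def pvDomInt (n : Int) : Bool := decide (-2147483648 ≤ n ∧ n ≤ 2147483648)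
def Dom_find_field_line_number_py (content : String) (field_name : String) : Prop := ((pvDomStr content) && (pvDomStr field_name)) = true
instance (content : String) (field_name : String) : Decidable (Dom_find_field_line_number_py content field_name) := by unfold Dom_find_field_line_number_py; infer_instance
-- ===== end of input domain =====

-- B replaces A's flag-driven loop by staged comprehension passes (header indices, body slice, region cut, first hit); same cost, different decomposition.

def pvMarker : List Char := "class EnhancedSystemConfig:".toList
def pvClassPrefix : List Char := "class ".toList

-- ===== PORT A =====
-- A's single loop over enumerate(lines, 1) with the in_enhanced_config flag as state.
def pvScanA (field : List Char) : List (List Char) → Int → Bool → Int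
  | [], _, _ => 0
  | l :: rest, i, flag =>
    if PySem.Chars.isIn pvMarker l then pvScanA field rest (i + 1) true
    else if flag && PySem.Chars.startswith (PySem.Chars.strip l) pvClassPrefix then 0
    else if flag && PySem.Chars.isIn (field ++ [':']) l then i
    else pvScanA field rest (i + 1) flag

def find_field_line_number_py (content : String) (field_name : String) : Int :=
  pvScanA field_name.toList (PySem.Chars.splitOn content.toList ['\n']) 1 false

-- ===== PORT B =====
-- port of B's comprehension '[i for i, line in enumerate(xs) if p(line)]'
def pvIdxWhere (p : List Char → Bool) : List (List Char) → Nat → List Nat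
  | [], _ => []
  | l :: rest, i => if p l then i :: pvIdxWhere p rest (i + 1) else pvIdxWhere p rest (i + 1)

def find_field_line_number_py_alt (content : String) (field_name : String) : Int :=
  let lines := PySem.Chars.splitOn content.toList ['\n']
  match pvIdxWhere (fun l => PySem.Chars.isIn pvMarker l) lines 0 with
  | [] => 0
  | s :: _ =>
    let body := lines.drop (s + 1)
    let region :=
      match pvIdxWhere (fun l => PySem.Chars.startswith (PySem.Chars.strip l) pvClassPrefix) body 0 with
      | [] => body
      | e :: _ => body.take e
    match pvIdxWhere (fun l => PySem.Chars.isIn (field_name.toList ++ [':']) l) region 0 with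
    | [] => 0
    | k :: _ => (s : Int) + 2 + (k : Int)

-- ===== PRECONDITION & SPEC =====
-- Pre_ excludes content in which the line 'class EnhancedSystemConfig:' occurs on more than one
-- line of the split: on such degenerate input A's flag-reset lets a repeated header line extend
-- (and be skipped inside) the region, while B's region cut ends it — both equally defensible.
def Pre_find_field_line_number_py (content : String) (field_name : String) : Prop :=
  ((PySem.Chars.splitOn content.toList ['\n']).filter (fun l => PySem.Chars.isIn pvMarker l)).length ≤ 1
instance (content : String) (field_name : String) : Decidable (Pre_find_field_line_number_py content field_name) := by unfold Pre_find_field_line_number_py; infer_instance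

def pvWitness_find_field_line_number_py : String × String :=
  ("class EnhancedSystemConfig:\n    x: 1\n\nclass Other:\n    y: 2", "x")

def Spec_find_field_line_number_py (content : String) (field_name : String) (out : Int) : Prop := out = find_field_line_number_py_alt content field_name
instance (content : String) (field_name : String) (out : Int) : Decidable (Spec_find_field_line_number_py content field_name out) := by unfold Spec_find_field_line_number_py; infer_instance

-- ===== CLAIM (what is proved, stated in full; the proofs are below) =====
def Claim_equal_find_field_line_number_py : Prop := ∀ (content : String) (field_name : String), Dom_find_field_line_number_py content field_name → Pre_find_field_line_number_py content field_name → Spec_find_field_line_number_py content field_name (find_field_line_number_py content field_name)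

-- ===== LEMMAS AND PROOFS =====

theorem pvIdxWhere_shift (p : List Char → Bool) (ls : List (List Char)) (n : Nat) :
    pvIdxWhere p ls (n + 1) = (pvIdxWhere p ls n).map (· + 1) := by
  induction ls generalizing n with
  | nil => rfl
  | cons l rest ih => simp only [pvIdxWhere]; split_ifs <;> simp [ih]

-- With the flag up and no later header line, A's loop returns the first field hit inside the region cut at the next class line.
theorem pvScanA_true (f : List Char) (ls : List (List Char)) (i : Int)
    (h : ∀ l ∈ ls, PySem.Chars.isIn pvMarker l = false) :
    pvScanA f ls i true =
      (match pvIdxWhere (fun l => PySem.Chars.isIn (f ++ [':']) l)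
          (match pvIdxWhere (fun l => PySem.Chars.startswith (PySem.Chars.strip l) pvClassPrefix) ls 0 with
           | [] => ls
           | e :: _ => ls.take e) 0 with
       | [] => 0
       | k :: _ => i + (k : Int)) := by
  induction ls generalizing i with
  | nil => rfl
  | cons l rest ih =>
    have hm := h l (List.mem_cons_self ..)
    have hr : ∀ x ∈ rest, PySem.Chars.isIn pvMarker x = false := fun x hx => h x (List.mem_cons_of_mem _ hx)
    by_cases hc : PySem.Chars.startswith (PySem.Chars.strip l) pvClassPrefix = true
    · simp [pvScanA, pvIdxWhere, hm, hc]
    · by_cases hn : PySem.Chars.isIn (f ++ [':']) l = true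
      · simp only [pvScanA, hm, hc, hn, Bool.true_and, if_false, if_true,
          Bool.false_eq_true]
        simp only [pvIdxWhere, hc, if_false, pvIdxWhere_shift, Bool.false_eq_true]
        cases hcr : pvIdxWhere (fun l => PySem.Chars.startswith (PySem.Chars.strip l) pvClassPrefix) rest 0 with
        | nil => simp [pvIdxWhere, hn]
        | cons e es => simp [pvIdxWhere, hn]
      · simp only [pvScanA, hm, hc, hn, Bool.true_and, if_false,
          Bool.false_eq_true]
        rw [ih (i + 1) hr]
        simp only [pvIdxWhere, hc, if_false, pvIdxWhere_shift, Bool.false_eq_true]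
        cases hcr : pvIdxWhere (fun l => PySem.Chars.startswith (PySem.Chars.strip l) pvClassPrefix) rest 0 with
        | nil =>
          simp only [List.map_nil]
          simp only [pvIdxWhere, hn, if_false, pvIdxWhere_shift, Bool.false_eq_true]
          cases pvIdxWhere (fun l => PySem.Chars.isIn (f ++ [':']) l) rest 0 with
          | nil => simp
          | cons k ks => simp; ring
        | cons e es =>
          simp only [List.map_cons, List.take_succ_cons]
          simp only [pvIdxWhere, hn, if_false, pvIdxWhere_shift, Bool.false_eq_true]
          cases pvIdxWhere (fun l => PySem.Chars.isIn (f ++ [':']) l) (rest.take e) 0 with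
          | nil => simp
          | cons k ks => simp; ring

-- After the first header line, a ≤1-header input has no further header line.
theorem pv_no_marker_after (ls : List (List Char))
    (hp : (ls.filter (fun l => PySem.Chars.isIn pvMarker l)).length ≤ 1) :
    ∀ s rest', pvIdxWhere (fun l => PySem.Chars.isIn pvMarker l) ls 0 = s :: rest' →
      ∀ l ∈ ls.drop (s + 1), PySem.Chars.isIn pvMarker l = false := by
  induction ls with
  | nil => intro s rest' h; simp [pvIdxWhere] at h
  | cons l rest ih =>
    intro s rest' h x hx
    by_cases hm : PySem.Chars.isIn pvMarker l = true
    · simp only [pvIdxWhere, hm, if_true] at h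
      obtain ⟨hs, _⟩ := List.cons.inj h
      subst hs
      simp only [List.filter_cons, hm, if_true, List.length_cons] at hp
      have hnil : rest.filter (fun l => PySem.Chars.isIn pvMarker l) = [] :=
        List.eq_nil_of_length_eq_zero (by omega)
      simp only [List.drop_succ_cons, List.drop_zero] at hx
      by_contra hc
      have : x ∈ rest.filter (fun l => PySem.Chars.isIn pvMarker l) :=
        List.mem_filter.mpr ⟨hx, by simpa using hc⟩
      simp [hnil] at this
    · simp only [pvIdxWhere, hm, if_false, pvIdxWhere_shift, Bool.false_eq_true] at h
      cases hr : pvIdxWhere (fun l => PySem.Chars.isIn pvMarker l) rest 0 with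
      | nil => rw [hr] at h; simp at h
      | cons s0 rs =>
        rw [hr] at h
        simp only [List.map_cons] at h
        obtain ⟨hs, _⟩ := List.cons.inj h
        have hp' : (rest.filter (fun l => PySem.Chars.isIn pvMarker l)).length ≤ 1 := by
          simpa [List.filter_cons, hm] using hp
        have := ih hp' s0 rs hr
        subst hs
        simp only [List.drop_succ_cons] at hx
        exact this x hx

-- With the flag down, A's loop skips to the first header line; on ≤1-header input the remainder matches B.
theorem pvScanA_main (f : List Char) (ls : List (List Char)) (i : Int)
    (hp : (ls.filter (fun l => PySem.Chars.isIn pvMarker l)).length ≤ 1) :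
    pvScanA f ls i false =
      (match pvIdxWhere (fun l => PySem.Chars.isIn pvMarker l) ls 0 with
       | [] => 0
       | s :: _ =>
         match pvIdxWhere (fun l => PySem.Chars.isIn (f ++ [':']) l)
            (match pvIdxWhere (fun l => PySem.Chars.startswith (PySem.Chars.strip l) pvClassPrefix) (ls.drop (s + 1)) 0 with
             | [] => ls.drop (s + 1)
             | e :: _ => (ls.drop (s + 1)).take e) 0 with
         | [] => 0
         | k :: _ => i + (s : Int) + 1 + (k : Int)) := by
  induction ls generalizing i with
  | nil => rfl
  | cons l rest ih =>
    by_cases hm : PySem.Chars.isIn pvMarker l = true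
    · have hafter := pv_no_marker_after (l :: rest) hp 0
        (pvIdxWhere (fun l => PySem.Chars.isIn pvMarker l) rest 1)
        (by simp [pvIdxWhere, hm])
      simp only [List.drop_succ_cons, List.drop_zero] at hafter
      simp only [pvScanA, pvIdxWhere, hm, if_true]
      rw [pvScanA_true f rest (i + 1) hafter]
      simp only [List.drop_succ_cons, List.drop_zero, Nat.cast_zero]
      cases pvIdxWhere (fun l => PySem.Chars.isIn (f ++ [':']) l)
          (match pvIdxWhere (fun l => PySem.Chars.startswith (PySem.Chars.strip l) pvClassPrefix) rest 0 with
           | [] => rest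
           | e :: _ => rest.take e) 0 with
      | nil => simp
      | cons k ks => simp only; ring
    · have hp' : (rest.filter (fun l => PySem.Chars.isIn pvMarker l)).length ≤ 1 := by
        simpa [List.filter_cons, hm] using hp
      simp only [pvScanA, pvIdxWhere, hm, if_false, pvIdxWhere_shift,
        Bool.false_eq_true]
      rw [ih (i + 1) hp']
      cases hr : pvIdxWhere (fun l => PySem.Chars.isIn pvMarker l) rest 0 with
      | nil => simp
      | cons s rs =>
        simp only [List.map_cons, List.drop_succ_cons]
        cases pvIdxWhere (fun l => PySem.Chars.isIn (f ++ [':']) l)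
            (match pvIdxWhere (fun l => PySem.Chars.startswith (PySem.Chars.strip l) pvClassPrefix) (rest.drop (s + 1)) 0 with
             | [] => rest.drop (s + 1)
             | e :: _ => (rest.drop (s + 1)).take e) 0 with
        | nil => simp
        | cons k ks => simp; ring

-- ===== VERDICT (by name: the statement is the Claim_ definition above) =====
theorem find_field_line_number_py_spec : Claim_equal_find_field_line_number_py := by
  intro content field_name _ hpre
  unfold Spec_find_field_line_number_py find_field_line_number_py find_field_line_number_py_alt
  rw [pvScanA_main _ _ _ hpre]
  cases h : pvIdxWhere (fun l => PySem.Chars.isIn pvMarker l)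
      (PySem.Chars.splitOn content.toList ['\n']) 0 with
  | nil => simp [h]
  | cons s rs =>
    simp only [h]
    cases h2 : pvIdxWhere (fun l => PySem.Chars.isIn (field_name.toList ++ [':']) l)
        (match pvIdxWhere (fun l => PySem.Chars.startswith (PySem.Chars.strip l) pvClassPrefix)
            ((PySem.Chars.splitOn content.toList ['\n']).drop (s + 1)) 0 with
         | [] => (PySem.Chars.splitOn content.toList ['\n']).drop (s + 1)
         | e :: _ => ((PySem.Chars.splitOn content.toList ['\n']).drop (s + 1)).take e) 0 with
    | nil => simp
    | cons k ks => simp only; ring
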